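-- pv_equiv track=rewrite | github.com/harrykang1212/trumarine-chatbot | app.py | build_tfidf_index
-- ===== SOURCE A (Python) =====
-- from collections import Counter
--
-- def tokenize(text):
--     return text.lower().split()
--
-- def build_tfidf_index(chunks):
--     df = Counter()
--     tfs = []
--     for chunk in chunks:
--         tokens = tokenize(chunk)
--         tf = Counter(tokens)
--         tfs.append(tf)
--         for word in set(tokens):
--             df[word] += 1
--     return tfs, df
-- ===== SOURCE B (Python) =====
-- from collections import Counter
--
-- def tokenize(text):
--     return text.lower().split()
--
-- def build_tfidf_index(chunks):
--     # word-major document-frequency computation: build the per-chunk term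
--     # frequencies, then iterate over the global vocabulary (first-occurrence
--     # order) and, for each word, count how many documents contain it.
--     token_lists = [tokenize(c) for c in chunks]
--     tfs = [Counter(ts) for ts in token_lists]
--     df = Counter()
--     for word in dict.fromkeys(w for ts in token_lists for w in ts):
--         df[word] = sum(1 for tf in tfs if word in tf)
--     return tfs, df
-- ===== Notes on version B (the rewrite author's own statement) =====
-- stated objective: alternative
-- what changed: df is computed word-major instead of document-major: instead of A's per-chunk loop that increments df for each unique token of the chunk, B first builds the global vocabulary in first-occurrence order and then, for each word, counts the documents containing it by a membership scan over the tf counters (transposed loop nesting, df assigned once per word rather than incremented per document).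
import Mathlib
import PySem

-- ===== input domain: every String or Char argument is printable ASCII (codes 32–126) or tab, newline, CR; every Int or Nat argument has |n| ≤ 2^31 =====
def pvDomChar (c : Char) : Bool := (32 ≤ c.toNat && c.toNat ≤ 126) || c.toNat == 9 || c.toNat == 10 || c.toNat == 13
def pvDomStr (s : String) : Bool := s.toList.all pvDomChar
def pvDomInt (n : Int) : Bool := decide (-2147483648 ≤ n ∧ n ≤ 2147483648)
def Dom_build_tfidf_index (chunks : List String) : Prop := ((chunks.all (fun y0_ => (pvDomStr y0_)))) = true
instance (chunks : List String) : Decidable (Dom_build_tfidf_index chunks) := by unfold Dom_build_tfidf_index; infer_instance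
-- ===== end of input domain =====

-- B computes df word-major (global vocabulary first, then per word a membership count over
-- the tf counters) instead of A's document-major fused loop; return value identical.

-- ===== PORT A =====
-- tokenize(text) = text.lower().split()
def pvTokenize (text : String) : List String := PySem.Str.split₀ (PySem.Str.lower text)

-- A's fused loop: state (df, tfs); per chunk append Counter(tokens) and bump df on set(tokens).
def build_tfidf_index (chunks : List String) : (List (List (String × Int))) × (List (String × Int)) :=
  let st := chunks.foldl
    (fun (st : PySem.Dict String Int × List (PySem.Dict String Int)) chunk =>
      let tokens := pvTokenize chunk
      let tf := PySem.Dict.counter tokens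
      let tfs := st.2 ++ [tf]
      let df := (PySem.Set.ofList tokens).foldl (fun d w => d.modify w 0 (· + 1)) st.1
      (df, tfs))
    (PySem.Dict.empty, [])
  (st.2.map PySem.Dict.items, st.1.items)

-- ===== PORT B =====
-- B: token lists, then tf counters, then vocabulary in first-occurrence order
-- (dict.fromkeys = PySem.List.dedup), then per word df[word] = number of tfs containing it.
def build_tfidf_index_alt (chunks : List String) : (List (List (String × Int))) × (List (String × Int)) :=
  let tls := chunks.map pvTokenize
  let tfs := tls.map PySem.Dict.counter
  let vocab := PySem.List.dedup tls.flatten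
  let df := vocab.foldl
    (fun (d : PySem.Dict String Int) w =>
      d.insert w (tfs.foldl (fun n tf => if tf.contains w then n + 1 else n) (0 : Int)))
    PySem.Dict.empty
  (tfs.map PySem.Dict.items, df.items)

-- ===== PRECONDITION & SPEC =====
def Spec_build_tfidf_index (chunks : List String) (out : (List (List (String × Int))) × (List (String × Int))) : Prop := out = build_tfidf_index_alt chunks
instance (chunks : List String) (out : (List (List (String × Int))) × (List (String × Int))) : Decidable (Spec_build_tfidf_index chunks out) := by unfold Spec_build_tfidf_index; infer_instance

-- ===== CLAIM (what is proved, stated in full; the proofs are below) =====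
def Claim_equal_build_tfidf_index : Prop := ∀ (chunks : List String), Dom_build_tfidf_index chunks → Spec_build_tfidf_index chunks (build_tfidf_index chunks)

-- ===== LEMMAS AND PROOFS =====

-- x ∈ Set.update s l ↔ x ∈ s ∨ x ∈ l
theorem set_mem_update {α : Type} [BEq α] [LawfulBEq α] (l : List α) (s : PySem.Set α) (x : α) :
    x ∈ PySem.Set.update s l ↔ x ∈ s ∨ x ∈ l := by
  induction l generalizing s with
  | nil => simp [PySem.Set.update]
  | cons y t ih =>
    simp only [PySem.Set.update, List.foldl_cons] at *
    rw [ih]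
    simp [PySem.Set.mem_add, or_assoc, or_comm, or_left_comm]

-- update s (add u y) = add (update s u) y
theorem set_update_add {α : Type} [BEq α] [LawfulBEq α] (u : PySem.Set α) (y : α) (s : PySem.Set α) :
    PySem.Set.update s (PySem.Set.add u y) = PySem.Set.add (PySem.Set.update s u) y := by
  by_cases hc : y ∈ u
  · have h1 : PySem.Set.add u y = u := by
      simp [PySem.Set.add, PySem.Set.contains, hc]
    have h2 : PySem.Set.add (PySem.Set.update s u) y = PySem.Set.update s u := by
      have : y ∈ PySem.Set.update s u := (set_mem_update u s y).mpr (Or.inr hc)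
      simp [PySem.Set.add, PySem.Set.contains, this]
    rw [h1, h2]
  · have h1 : PySem.Set.add u y = u ++ [y] := by
      simp [PySem.Set.add, PySem.Set.contains, hc]
    rw [h1]
    show (u ++ [y]).foldl PySem.Set.add s = _
    rw [List.foldl_append]
    rfl

-- update s (update u t) = update (update s u) t
theorem set_update_update {α : Type} [BEq α] [LawfulBEq α] (t : List α) (u s : PySem.Set α) :
    PySem.Set.update s (PySem.Set.update u t) = PySem.Set.update (PySem.Set.update s u) t := by
  induction t generalizing u s with
  | nil => rfl
  | cons y t ih =>
    show PySem.Set.update s (PySem.Set.update (PySem.Set.add u y) t)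
        = PySem.Set.update (PySem.Set.update s u) (y :: t)
    rw [ih]
    show _ = PySem.Set.update (PySem.Set.add (PySem.Set.update s u) y) t
    rw [set_update_add]

-- update s (set(t)) = update s t
theorem set_update_ofList {α : Type} [BEq α] [LawfulBEq α] (t : List α) (s : PySem.Set α) :
    PySem.Set.update s (PySem.Set.ofList t) = PySem.Set.update s t := by
  have := set_update_update t (PySem.Set.empty) s
  simpa [PySem.Set.ofList_eq_foldl, PySem.Set.update, PySem.Set.empty] using this

-- dedup of a flattened list of per-chunk dedups = dedup of the flattened list
theorem set_ofList_flatten_ofList {α : Type} [BEq α] [LawfulBEq α] (ls : List (List α)) (s : PySem.Set α) :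
    PySem.Set.update s (ls.map PySem.Set.ofList).flatten = PySem.Set.update s ls.flatten := by
  induction ls generalizing s with
  | nil => rfl
  | cons t ls ih =>
    show PySem.Set.update s (PySem.Set.ofList t ++ (ls.map PySem.Set.ofList).flatten)
        = PySem.Set.update s (t ++ ls.flatten)
    simp only [PySem.Set.update, List.foldl_append] at *
    rw [show (PySem.Set.ofList t).foldl PySem.Set.add s
          = PySem.Set.update s (PySem.Set.ofList t) from rfl,
        set_update_ofList]
    exact ih _

-- count of w in the flattened per-chunk dedups = number of chunks containing w
theorem count_flatten_ofList (ls : List (List String)) (w : String) :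
    ((ls.map PySem.Set.ofList).flatten.count w) = ls.countP (fun ts => ts.contains w) := by
  induction ls with
  | nil => rfl
  | cons t ls ih =>
    simp only [List.map_cons, List.flatten_cons, List.count_append, List.countP_cons, ih]
    by_cases h : w ∈ t
    · have hm : w ∈ PySem.Set.ofList t := (PySem.Set.mem_ofList t w).mpr h
      have hd : (PySem.Set.ofList t).Nodup := PySem.Set.nodup_ofList t
      have h1 : (PySem.Set.ofList t).count w ≤ 1 := List.nodup_iff_count_le_one.mp hd w
      have h2 : 0 < (PySem.Set.ofList t).count w := List.count_pos_iff.mpr hm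
      have hc : t.contains w = true := by simpa using h
      rw [if_pos hc]
      omega
    · have hm : w ∉ PySem.Set.ofList t := fun hx => h ((PySem.Set.mem_ofList t w).mp hx)
      have hc : ¬ t.contains w = true := by simpa using h
      rw [if_neg hc, List.count_eq_zero.mpr hm]
      omega

-- A's paired fold, split into the df fold over the flattened per-chunk dedups and the tf list
theorem build_tfidf_state_eq (chunks : List String)
    (d : PySem.Dict String Int) (acc : List (PySem.Dict String Int)) :
    chunks.foldl
      (fun (st : PySem.Dict String Int × List (PySem.Dict String Int)) chunk =>
        (( (PySem.Set.ofList (pvTokenize chunk)).foldl (fun d w => d.modify w 0 (· + 1)) st.1),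
         st.2 ++ [PySem.Dict.counter (pvTokenize chunk)]))
      (d, acc) =
    (((chunks.map (fun c => PySem.Set.ofList (pvTokenize c))).flatten).foldl
       (fun d w => d.modify w 0 (· + 1)) d,
     acc ++ chunks.map (fun chunk => PySem.Dict.counter (pvTokenize chunk))) := by
  induction chunks generalizing d acc with
  | nil => simp
  | cons c cs ih =>
    simp only [List.foldl_cons, List.map_cons, List.flatten_cons, List.foldl_append, ih]
    simp

-- ===== VERDICT (by name: the statement is the Claim_ definition above) =====
theorem build_tfidf_index_spec : Claim_equal_build_tfidf_index := by
  intro chunks _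
  unfold Spec_build_tfidf_index build_tfidf_index build_tfidf_index_alt
  rw [build_tfidf_state_eq chunks]
  have hmap : chunks.map (fun c => PySem.Set.ofList (pvTokenize c))
      = (chunks.map pvTokenize).map PySem.Set.ofList := by simp [List.map_map]
  -- df of A is a Counter of the flattened per-chunk dedups
  have hA : ((chunks.map (fun c => PySem.Set.ofList (pvTokenize c))).flatten).foldl
      (fun (d : PySem.Dict String Int) w => d.modify w 0 (· + 1)) PySem.Dict.empty
      = PySem.Dict.counter ((chunks.map (fun c => PySem.Set.ofList (pvTokenize c))).flatten) :=
    (PySem.Dict.counter_eq_foldl _).symm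
  rw [hA, hmap]
  -- vocabulary of B
  have hvocab : PySem.List.dedup ((chunks.map pvTokenize).flatten)
      = PySem.Set.ofList (((chunks.map pvTokenize).map PySem.Set.ofList).flatten) := by
    rw [PySem.List.dedup_eq_ofList]
    have := set_ofList_flatten_ofList (chunks.map pvTokenize) (PySem.Set.empty)
    simpa [PySem.Set.ofList_eq_foldl, PySem.Set.update, PySem.Set.empty] using this.symm
  have hnd : (PySem.Set.ofList (((chunks.map pvTokenize).map PySem.Set.ofList).flatten)).Nodup :=
    PySem.Set.nodup_ofList _
  -- B's df items: fresh distinct inserts append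
  have hB : ((PySem.List.dedup ((chunks.map pvTokenize).flatten)).foldl
      (fun (d : PySem.Dict String Int) w =>
        d.insert w (((chunks.map pvTokenize).map PySem.Dict.counter).foldl
          (fun n tf => if tf.contains w then n + 1 else n) (0 : Int)))
      PySem.Dict.empty).items
      = (PySem.List.dedup ((chunks.map pvTokenize).flatten)).map
          (fun w => (w, ((chunks.map pvTokenize).map PySem.Dict.counter).foldl
            (fun n tf => if tf.contains w then n + 1 else n) (0 : Int))) := by
    have := PySem.Dict.items_foldl_insert_fresh
      (l := PySem.List.dedup ((chunks.map pvTokenize).flatten))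
      (d := PySem.Dict.empty)
      (k := fun w => w)
      (v := fun w => ((chunks.map pvTokenize).map PySem.Dict.counter).foldl
          (fun n tf => if tf.contains w then n + 1 else n) (0 : Int))
      (by intro a _; exact PySem.Dict.contains_empty a)
      (by rw [List.map_id']; rw [hvocab]; exact hnd)
    simpa using this
  refine Prod.ext ?_ ?_
  · simp [List.map_map]
  · refine Eq.trans ?_ hB.symm
    show (PySem.Dict.counter
        (List.map PySem.Set.ofList (List.map pvTokenize chunks)).flatten).items = _
    rw [PySem.Dict.items_counter, hvocab]
    refine List.map_congr_left ?_
    intro w _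
    refine Prod.ext rfl ?_
    show ((((chunks.map pvTokenize).map PySem.Set.ofList).flatten).count w : Int) = _
    rw [count_flatten_ofList]
    rw [PySem.List.foldl_if_add_one (p := fun tf : PySem.Dict String Int => tf.contains w)]
    conv_rhs => rw [List.countP_map]
    have hpt : ∀ ts ∈ chunks.map pvTokenize,
        (fun ts : List String => ts.contains w) ts = true ↔
        ((fun tf : PySem.Dict String Int => tf.contains w) ∘ PySem.Dict.counter) ts = true := by
      intro ts _
      simp [PySem.Dict.contains_counter]
    rw [List.countP_congr hpt]
    omega
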